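-- pv_equiv track=rewrite | github.com/lidongze6/leetcode- | 解码字符串.py | helper
-- ===== SOURCE A (Python) =====
-- def helper(S, l, r, res):
--     # 递归版本
--     if S.isalpha():
--         return S
--     tmp = res
--     for i in range(l, r):
--         if S[i].isalpha():
--             tmp += S[i]
--         if S[i].isdigit():
--             return helper(S, i + 1, r, tmp * int(S[i]))
--     return tmp
-- ===== SOURCE B (Python) =====
-- def helper(S, l, r, res):
--     # two-stage version: tokenize S[l:r] into (letter-run, multiplier) chunks,
--     # then fold the chunks over the accumulator
--     if S.isalpha():
--         return S
--     chunks = []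
--     cur = ""
--     for i in range(l, r):
--         c = S[i]
--         if c.isalpha():
--             cur += c
--         elif c.isdigit():
--             chunks.append((cur, int(c)))
--             cur = ""
--     tmp = res
--     for seg, d in chunks:
--         tmp = (tmp + seg) * d
--     return tmp + cur
-- ===== Notes on version B (the rewrite author's own statement) =====
-- stated objective: alternative
-- what changed: Replaces A's recursion (restarting helper on every digit and re-testing S.isalpha each time) with two staged passes: first tokenize S[l:r] into (letter-run, multiplier) chunks, then fold tmp = (tmp+seg)*d over the chunk list.
import Mathlib
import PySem

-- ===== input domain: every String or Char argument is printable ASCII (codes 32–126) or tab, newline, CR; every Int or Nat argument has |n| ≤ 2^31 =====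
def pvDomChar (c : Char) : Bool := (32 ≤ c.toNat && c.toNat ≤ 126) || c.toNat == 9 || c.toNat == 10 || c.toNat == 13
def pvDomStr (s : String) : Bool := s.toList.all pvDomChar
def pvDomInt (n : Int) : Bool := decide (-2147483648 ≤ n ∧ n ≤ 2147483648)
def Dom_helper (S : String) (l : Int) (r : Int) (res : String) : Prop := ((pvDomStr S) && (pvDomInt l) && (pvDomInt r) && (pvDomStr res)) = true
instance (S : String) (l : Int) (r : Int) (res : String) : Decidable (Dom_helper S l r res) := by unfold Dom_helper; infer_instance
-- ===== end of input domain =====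

-- B replaces A's digit-triggered recursive restarts by two staged passes: tokenize the
-- range into (letter-run, multiplier) chunks, then fold the chunks (objective: alternative).

-- ===== PORT A =====
-- A's for-loop; the recursive call `return helper(S, i+1, r, tmp*int(S[i]))` is transcribed
-- as its one-step unfolding (the `S.isalpha()` check, then the loop from i+1 — S is unchanged).
def helperGoA (S : List Char) (r : Int) (i : Int) (tmp : List Char) : List Char :=
  if h : i < r then
    match PySem.List.pyGet? S i with
    | none => tmp          -- Python raises IndexError here; such inputs are outside Pre_helper
    | some c =>
      let tmp' := if PySem.Chars.isalpha c then tmp ++ [c] else tmp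
      if PySem.Chars.isdigit c then
        if PySem.Chars.strIsalpha S then S
        -- int(S[i]) of a digit char is its code point minus 48 (exact on '0'..'9')
        else helperGoA S r (i + 1) (PySem.List.pyRepeat tmp' ((c.toNat : Int) - 48))
      else helperGoA S r (i + 1) tmp'
  else tmp
termination_by (r - i).toNat
decreasing_by all_goals omega

def helper (S : String) (l : Int) (r : Int) (res : String) : String :=
  if PySem.Str.strIsalpha S then S
  else String.mk (helperGoA S.toList r l res.toList)

-- ===== PORT B =====
-- pass 1 of Source B: build the (letter-run, single-digit multiplier) chunk list and trailing run
def tokStep (S : List Char) (st : List (List Char × Int) × List Char) (i : Int) :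
    List (List Char × Int) × List Char :=
  match PySem.List.pyGet? S i with
  | none => st             -- Python raises IndexError here; such inputs are outside Pre_helper
  | some c =>
    if PySem.Chars.isalpha c then (st.1, st.2 ++ [c])
    -- int(c) of a digit char is its code point minus 48 (exact on '0'..'9')
    else if PySem.Chars.isdigit c then (st.1 ++ [(st.2, (c.toNat : Int) - 48)], [])
    else st

-- pass 2 of Source B: tmp = (tmp + seg) * d over the chunks
def applyChunks (t : List Char) (ch : List (List Char × Int)) : List Char :=
  ch.foldl (fun a p => PySem.List.pyRepeat (a ++ p.1) p.2) t

def helper_alt (S : String) (l : Int) (r : Int) (res : String) : String :=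
  if PySem.Str.strIsalpha S then S
  else
    let st := (PySem.List.pyRange l r 1).foldl (tokStep S.toList) ([], [])
    String.mk (applyChunks res.toList st.1 ++ st.2)

-- ===== PRECONDITION & SPEC =====
-- Pre_ excludes exactly the inputs on which A raises IndexError: S not all-alphabetic and
-- some index in range(l, r) outside [-len(S), len(S)).
def Pre_helper (S : String) (l : Int) (r : Int) (res : String) : Prop :=
  PySem.Str.strIsalpha S = true ∨ r ≤ l ∨
    (-(S.toList.length : Int) ≤ l ∧ r ≤ (S.toList.length : Int))
instance (S : String) (l : Int) (r : Int) (res : String) : Decidable (Pre_helper S l r res) := by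
  unfold Pre_helper; infer_instance
def pvWitness_helper : String × Int × Int × String := ("a1b2", 0, 4, "x")

def Spec_helper (S : String) (l : Int) (r : Int) (res : String) (out : String) : Prop := out = helper_alt S l r res
instance (S : String) (l : Int) (r : Int) (res : String) (out : String) : Decidable (Spec_helper S l r res out) := by unfold Spec_helper; infer_instance

-- ===== CLAIM (what is proved, stated in full; the proofs are below) =====
def Claim_equal_helper : Prop := ∀ (S : String) (l : Int) (r : Int) (res : String), Dom_helper S l r res → Pre_helper S l r res → Spec_helper S l r res (helper S l r res)

-- ===== LEMMAS AND PROOFS =====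

theorem digit_not_alpha (c : Char) (h : PySem.Chars.isdigit c = true) :
    PySem.Chars.isalpha c = false := by
  have h0 : '0'.val.toNat = 48 := rfl
  have h9 : '9'.val.toNat = 57 := rfl
  have hA : 'A'.val.toNat = 65 := rfl
  have hZ : 'Z'.val.toNat = 90 := rfl
  have ha : 'a'.val.toNat = 97 := rfl
  have hz : 'z'.val.toNat = 122 := rfl
  simp only [PySem.Chars.isdigit, PySem.Chars.isalpha, PySem.Chars.isupper, PySem.Chars.islower,
    Bool.and_eq_true, Bool.or_eq_false_iff, Bool.and_eq_false_iff, decide_eq_true_eq,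
    decide_eq_false_iff_not, Char.le_def, UInt32.le_iff_toNat_le, h0, h9, hA, hZ, ha, hz] at *
  omega

theorem applyChunks_concat (t cur : List Char) (ch : List (List Char × Int)) (d : Int) :
    applyChunks t (ch ++ [(cur, d)]) = PySem.List.pyRepeat (applyChunks t ch ++ cur) d := by
  simp [applyChunks, List.foldl_append]

-- loop invariant: at position i, A's accumulator is applyChunks t ch ++ cur for
-- B's tokenizer state (ch, cur); then the two remaining computations agree.
theorem goA_eq_chunks (S : List Char) (r : Int) (hS : PySem.Chars.strIsalpha S = false) :
    ∀ (n : Nat) (i : Int) (ch : List (List Char × Int)) (cur t : List Char), (r - i).toNat = n →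
    (∀ j : Int, i ≤ j → j < r → PySem.Raise.InRange S.length j) →
    helperGoA S r i (applyChunks t ch ++ cur) =
      (let st := (PySem.List.pyRange i r 1).foldl (tokStep S) (ch, cur)
       applyChunks t st.1 ++ st.2) := by
  intro n
  induction n with
  | zero =>
      intro i ch cur t hn _
      rw [helperGoA, dif_neg (by omega), PySem.List.pyRange_one_eq_nil (by omega)]
      simp
  | succ n ih =>
      intro i ch cur t hn hin
      have h : i < r := by omega
      obtain ⟨c, hget⟩ : ∃ c, PySem.List.pyGet? S i = some c := by
        have hr := hin i le_rfl h
        cases hc : PySem.List.pyGet? S i with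
        | none => exact absurd ((PySem.List.pyGet?_eq_none_iff S i).mp hc) (by simp [hr])
        | some c => exact ⟨c, rfl⟩
      rw [PySem.List.pyRange_one_cons h, List.foldl_cons]
      have hrec := fun ch cur => ih (i + 1) ch cur t (by omega) (fun j _ hjr => hin j (by omega) hjr)
      by_cases hd : PySem.Chars.isdigit c = true
      · have ha := digit_not_alpha c hd
        have hstep : tokStep S (ch, cur) i = (ch ++ [(cur, (c.toNat : Int) - 48)], []) := by
          simp [tokStep, hget, ha, hd]
        rw [hstep, helperGoA, dif_pos h]
        simp only [hget, ha, Bool.false_eq_true, if_false, hd, if_true, hS]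
        have := hrec (ch ++ [(cur, (c.toNat : Int) - 48)]) []
        rw [applyChunks_concat] at this
        simpa using this
      · by_cases ha : PySem.Chars.isalpha c = true
        · have hstep : tokStep S (ch, cur) i = (ch, cur ++ [c]) := by simp [tokStep, hget, ha]
          rw [hstep, helperGoA, dif_pos h]
          simp only [hget, ha, if_true, hd, Bool.false_eq_true, if_false]
          have := hrec ch (cur ++ [c])
          rw [← List.append_assoc] at this
          exact this
        · have hstep : tokStep S (ch, cur) i = (ch, cur) := by simp [tokStep, hget, ha, hd]
          rw [hstep, helperGoA, dif_pos h]
          simp only [hget, ha, Bool.false_eq_true, if_false, hd]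
          exact hrec ch cur

-- ===== VERDICT (by name: the statement is the Claim_ definition above) =====
theorem helper_spec : Claim_equal_helper := by
  intro S l r res _ hpre
  unfold Spec_helper helper helper_alt
  by_cases hS : PySem.Str.strIsalpha S = true
  · simp only [PySem.Str.strIsalpha] at hS
    simp [hS]
  · have hS' : PySem.Chars.strIsalpha S.toList = false := by
      simpa using Bool.eq_false_iff.mpr (by simpa using hS)
    simp only [Bool.eq_false_iff.mpr (by simpa using hS : PySem.Str.strIsalpha S ≠ true),
      Bool.false_eq_true, if_false]
    have key := goA_eq_chunks S.toList r hS' (r - l).toNat l [] [] res.toList rfl ?_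
    · refine congrArg String.mk ?_
      simpa [applyChunks] using key
    · intro j hj hjr
      rcases hpre with hp | hp | hp
      · exact absurd hp hS
      · exact absurd (lt_of_le_of_lt hj hjr) (not_lt.mpr hp)
      · exact ⟨by omega, by omega⟩
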